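-- pv_equiv track=rewrite | github.com/TrigpointingUK/fastapi | app/crud/user.py | find_duplicate_emails
-- ===== SOURCE A (Python) =====
-- from typing import Any, Dict, List, Optional
--
-- def find_duplicate_emails(emails: List[str]) -> Dict[str, List[str]]:
--     """
--     Find duplicate email addresses (case-insensitive).
--
--     Args:
--         emails: List of email addresses
--
--     Returns:
--         Dictionary mapping email addresses to lists of original email addresses
--         that are duplicates (case-insensitive). Only includes entries where
--         multiple email addresses map to the same normalized email.
--     """
--     email_to_originals: Dict[str, List[str]] = {}
--
--     for email in emails:
--         if not email:
--             continue
--         # Normalize email to lowercase for comparison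
--         normalized = email.lower().strip()
--         if normalized not in email_to_originals:
--             email_to_originals[normalized] = []
--         email_to_originals[normalized].append(email)
--
--     # Return only duplicates
--     duplicates = {
--         normalized: originals
--         for normalized, originals in email_to_originals.items()
--         if len(originals) > 1
--     }
--     return duplicates
-- ===== SOURCE B (Python) =====
-- def find_duplicate_emails(emails):
--     """Two-pass: count normalized keys first, then re-scan the input and
--     collect originals only for keys whose count exceeds one."""
--     counts = {}
--     for email in emails:
--         if not email:
--             continue
--         k = email.lower().strip()
--         counts[k] = counts.get(k, 0) + 1
--     result = {}
--     for email in emails: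
--         if not email:
--             continue
--         k = email.lower().strip()
--         if counts[k] > 1:
--             result.setdefault(k, []).append(email)
--     return result
-- ===== Notes on version B (the rewrite author's own statement) =====
-- stated objective: alternative
-- what changed: Replaces group-all-then-filter (build lists for every key, then drop singletons) by count-then-collect: a first pass builds an int counter of normalized keys, a second pass over the original list appends originals only for keys whose count exceeds one, so no lists are ever built for unique emails.
import Mathlib
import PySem

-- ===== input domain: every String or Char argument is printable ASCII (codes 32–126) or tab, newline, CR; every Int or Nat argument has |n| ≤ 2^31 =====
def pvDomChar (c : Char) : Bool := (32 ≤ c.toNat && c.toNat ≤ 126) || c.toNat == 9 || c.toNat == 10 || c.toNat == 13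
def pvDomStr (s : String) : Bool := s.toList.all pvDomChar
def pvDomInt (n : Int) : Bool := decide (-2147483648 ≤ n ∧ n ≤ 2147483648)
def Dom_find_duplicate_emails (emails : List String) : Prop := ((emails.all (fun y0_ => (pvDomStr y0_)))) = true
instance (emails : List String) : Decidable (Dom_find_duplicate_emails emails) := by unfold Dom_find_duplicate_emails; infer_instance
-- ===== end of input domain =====

-- B replaces A's group-everything-then-filter by a count-then-collect two-pass scheme (alternative decomposition, same cost).

-- normalized key: email.lower().strip()
def pvKey (e : String) : String := PySem.Str.strip (PySem.Str.lower e)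

-- ===== PORT A =====
def find_duplicate_emails (emails : List String) : List (String × List String) :=
  let email_to_originals : PySem.Dict String (List String) :=
    emails.foldl (fun d email =>
      if email = "" then d
      else
        let normalized := pvKey email
        let d := if d.contains normalized then d else d.insert normalized ([] : List String)
        d.modify normalized [] (fun l => l ++ [email])) PySem.Dict.empty
  email_to_originals.items.filter (fun kv => kv.2.length > 1)

-- ===== PORT B =====
def find_duplicate_emails_alt (emails : List String) : List (String × List String) :=
  let counts : PySem.Dict String Int :=
    emails.foldl (fun c email =>
      if email = "" then c
      else
        let k := pvKey email
        c.insert k (c.getD k 0 + 1)) PySem.Dict.empty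
  let result : PySem.Dict String (List String) :=
    emails.foldl (fun r email =>
      if email = "" then r
      else
        let k := pvKey email
        if counts.getD k 0 > 1 then r.modify k [] (fun l => l ++ [email]) else r) PySem.Dict.empty
  result.items

-- ===== PRECONDITION & SPEC =====
def Spec_find_duplicate_emails (emails : List String) (out : List (String × List String)) : Prop := out = find_duplicate_emails_alt emails
instance (emails : List String) (out : List (String × List String)) : Decidable (Spec_find_duplicate_emails emails out) := by unfold Spec_find_duplicate_emails; infer_instance

-- ===== CLAIM (what is proved, stated in full; the proofs are below) =====
def Claim_equal_find_duplicate_emails : Prop := ∀ (emails : List String), Dom_find_duplicate_emails emails → Spec_find_duplicate_emails emails (find_duplicate_emails emails)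

-- ===== LEMMAS AND PROOFS =====

-- proof-only helpers
def pvEs (emails : List String) : List String := emails.filter (fun e => e != "")
def pvGrp (l : List String) (k : String) : List String := l.filter (fun e => pvKey e == k)
def pvRHS (es : List String) : List (String × List String) :=
  ((PySem.Set.ofList (es.map pvKey)).filter (fun k => decide ((pvGrp es k).length > 1))).map
    (fun k => (k, pvGrp es k))

-- A's 'if absent insert [] then append' step is one modify with default []
theorem step_collapse (d : PySem.Dict String (List String)) (n e : String) :
    (if d.contains n then d else d.insert n ([] : List String)).modify n [] (fun l => l ++ [e])
      = d.modify n [] (fun l => l ++ [e]) := by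
  by_cases h : d.contains n
  · simp [h]
  · have h' : d.contains n = false := by simpa using h
    simp only [h', Bool.false_eq_true, if_false, PySem.Dict.modify,
      PySem.Dict.insert_insert_self, PySem.Dict.getD_insert_self,
      PySem.Dict.getD_of_not_contains d ([] : List String) h']

-- dedup (first occurrence) commutes with filter
theorem ofList_filter (q : String → Bool) (l : List String) :
    PySem.Set.ofList (l.filter q) = (PySem.Set.ofList l).filter q := by
  induction l using List.reverseRecOn with
  | nil => rfl
  | append_singleton xs x ih =>
    rw [List.filter_append, List.filter_singleton, PySem.Set.ofList_append_singleton]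
    by_cases hq : q x
    · rw [hq, cond_true, PySem.Set.ofList_append_singleton, ih]
      by_cases hx : x ∈ PySem.Set.ofList xs
      · rw [PySem.Set.add_of_mem hx,
          PySem.Set.add_of_mem (List.mem_filter.mpr ⟨hx, hq⟩)]
      · rw [PySem.Set.add_of_not_mem hx,
          PySem.Set.add_of_not_mem (fun hc => hx (List.mem_filter.mp hc).1),
          List.filter_append, List.filter_singleton, hq, cond_true]
    · have hq' : q x = false := by simpa using hq
      rw [hq', cond_false, List.append_nil, ih]
      by_cases hx : x ∈ PySem.Set.ofList xs
      · rw [PySem.Set.add_of_mem hx]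
      · rw [PySem.Set.add_of_not_mem hx, List.filter_append, List.filter_singleton,
          hq', cond_false, List.append_nil]

-- the grouping fold, characterized
theorem group_items (l : List String) :
    (l.foldl (fun d e => d.modify (pvKey e) [] (fun v => v ++ [e]))
        (PySem.Dict.empty : PySem.Dict String (List String))).items
      = (PySem.Set.ofList (l.map pvKey)).map (fun k => (k, pvGrp l k)) := by
  have hnd : (l.foldl (fun d e => d.modify (pvKey e) [] (fun v => v ++ [e]))
      (PySem.Dict.empty : PySem.Dict String (List String))).keys.Nodup :=
    PySem.Dict.nodup_keys_foldl_modify_key l pvKey [] (fun d e v => v ++ [e]) _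
      (by simp [PySem.Dict.keys_empty])
  rw [PySem.Dict.items_eq_map_keys _ hnd []]
  have hkeys : (l.foldl (fun d e => d.modify (pvKey e) [] (fun v => v ++ [e]))
      (PySem.Dict.empty : PySem.Dict String (List String))).keys
      = PySem.Set.ofList (l.map pvKey) := by
    rw [PySem.Dict.keys_foldl_modify_key]
    simp [PySem.Dict.keys_empty, PySem.Set.update_nil_left]
  rw [hkeys]
  apply List.map_congr_left
  intro k _
  have hfold : (l.foldl (fun d e => d.modify (pvKey e) [] (fun v => v ++ [e]))
      (PySem.Dict.empty : PySem.Dict String (List String)))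
      = ((l.map (fun e => (pvKey e, e))).foldl
          (fun d p => d.modify p.1 [] (fun v => v ++ [p.2])) PySem.Dict.empty) := by
    rw [List.foldl_map]
  rw [hfold, PySem.Dict.getD_foldl_modify_append]
  simp [pvGrp, PySem.Dict.getD_empty, List.filter_map, List.map_map, Function.comp_def]

-- count of a key in the mapped list = length of that key's group
theorem count_eq_group_length (l : List String) (k : String) :
    (l.map pvKey).count k = (pvGrp l k).length := by
  rw [List.count_eq_countP, List.countP_eq_length_filter, List.filter_map, List.length_map]
  simp [pvGrp, Function.comp_def]

-- A computes pvRHS of the nonempty emails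
theorem A_eq (emails : List String) : find_duplicate_emails emails = pvRHS (pvEs emails) := by
  unfold find_duplicate_emails
  dsimp only
  have h1 : (fun (d : PySem.Dict String (List String)) email =>
        if email = "" then d
        else (if d.contains (pvKey email) then d
              else d.insert (pvKey email) ([] : List String)).modify
                (pvKey email) [] (fun l => l ++ [email]))
      = (fun d email => if (email != "") = true then
            d.modify (pvKey email) [] (fun l => l ++ [email]) else d) := by
    funext d email
    by_cases h : email = "" <;> simp [h, step_collapse]
  rw [h1, PySem.List.foldl_if_eq_foldl_filter]
  rw [show emails.filter (fun e => e != "") = pvEs emails from rfl]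
  rw [group_items, List.filter_map]
  rfl

-- B computes pvRHS of the nonempty emails
set_option maxHeartbeats 1600000 in
theorem B_eq (emails : List String) : find_duplicate_emails_alt emails = pvRHS (pvEs emails) := by
  unfold find_duplicate_emails_alt
  dsimp only
  -- the counter
  have hc1 : (fun (c : PySem.Dict String Int) email =>
        if email = "" then c else c.insert (pvKey email) (c.getD (pvKey email) 0 + 1))
      = (fun c email => if (email != "") = true then
            c.insert (pvKey email) (c.getD (pvKey email) 0 + 1) else c) := by
    funext c email; by_cases h : email = "" <;> simp [h]
  rw [hc1, PySem.List.foldl_if_eq_foldl_filter]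
  have hcnt : ∀ k, ((emails.filter (fun e => e != "")).foldl
        (fun c email => c.insert (pvKey email) (c.getD (pvKey email) 0 + 1))
        (PySem.Dict.empty : PySem.Dict String Int)).getD k 0
      = (((pvEs emails).map pvKey).count k : Int) := by
    intro k
    rw [← List.foldl_map (f := pvKey)
        (g := fun (c : PySem.Dict String Int) x => c.insert x (c.getD x 0 + 1)),
      PySem.Dict.foldl_insert_getD_add_one_eq_counter, PySem.Dict.getD_counter]
    rfl
  -- the collecting pass
  have h2 : (fun (r : PySem.Dict String (List String)) email =>
        if email = "" then r
        else if ((emails.filter (fun e => e != "")).foldl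
            (fun c email => c.insert (pvKey email) (c.getD (pvKey email) 0 + 1))
            (PySem.Dict.empty : PySem.Dict String Int)).getD (pvKey email) 0 > 1 then
          r.modify (pvKey email) [] (fun l => l ++ [email]) else r)
      = (fun r email => if (decide ((((pvEs emails).map pvKey).count (pvKey email) : Int) > 1) && (email != "")) = true then
            r.modify (pvKey email) [] (fun l => l ++ [email]) else r) := by
    funext r email
    by_cases h : email = ""
    · simp [h]
    · rw [hcnt]
      by_cases hgt : (((pvEs emails).map pvKey).count (pvKey email) : Int) > 1 <;> simp [h, hgt]
  rw [h2, PySem.List.foldl_if_eq_foldl_filter, ← List.filter_filter, group_items]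
  rw [show emails.filter (fun e => e != "") = pvEs emails from rfl]
  -- rewrite the inner filter predicate through pvKey
  have hq : (pvEs emails).filter
        (fun email => decide ((((pvEs emails).map pvKey).count (pvKey email) : Int) > 1))
      = (pvEs emails).filter
        ((fun k => decide ((pvGrp (pvEs emails) k).length > 1)) ∘ pvKey) := by
    apply List.filter_congr
    intro e _
    simp [count_eq_group_length]
  rw [hq]
  have hmapf : ((pvEs emails).filter
        ((fun k => decide ((pvGrp (pvEs emails) k).length > 1)) ∘ pvKey)).map pvKey
      = ((pvEs emails).map pvKey).filter (fun k => decide ((pvGrp (pvEs emails) k).length > 1)) := by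
    rw [List.filter_map]
  rw [hmapf, ofList_filter]
  unfold pvRHS
  apply List.map_congr_left
  intro k hk
  have hqk : decide ((pvGrp (pvEs emails) k).length > 1) = true := (List.mem_filter.mp hk).2
  have hsub : pvGrp ((pvEs emails).filter
        ((fun k => decide ((pvGrp (pvEs emails) k).length > 1)) ∘ pvKey)) k
      = pvGrp (pvEs emails) k := by
    unfold pvGrp
    rw [List.filter_filter]
    apply List.filter_congr
    intro e _
    by_cases he : pvKey e = k
    · simp [he]
      simpa [pvGrp] using hqk
    · simp [he]
  rw [hsub]

-- ===== VERDICT (by name: the statement is the Claim_ definition above) =====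
theorem find_duplicate_emails_spec : Claim_equal_find_duplicate_emails := by
  intro emails _
  unfold Spec_find_duplicate_emails
  rw [A_eq, B_eq]
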